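-- pv_equiv track=rewrite | github.com/falloutxAY/rdf-fabric-ontology-converter | samples/plugins/csv_schema_converter.py | _group_by_entity
-- ===== SOURCE A (Python) =====
-- from typing import Any, Dict, List, Optional, Union
--
-- def _group_by_entity(
--
--     rows: List[Dict[str, str]]
-- ) -> Dict[str, List[Dict[str, str]]]:
--     """
--     Group CSV rows by entity name.
--
--     Args:
--         rows: List of row dictionaries.
--
--     Returns:
--         Dictionary mapping entity names to their property rows.
--     """
--     entities: Dict[str, List[Dict[str, str]]] = {}
--
--     for row in rows:
--         entity_name = row.get('entity_name', '').strip()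
--         if not entity_name:
--             continue
--
--         if entity_name not in entities:
--             entities[entity_name] = []
--         entities[entity_name].append(row)
--
--     return entities
-- ===== SOURCE B (Python) =====
-- def _group_by_entity(rows):
--     names = [row.get('entity_name', '').strip() for row in rows]
--     keys = list(dict.fromkeys(n for n in names if n))
--     return {k: [row for row, n in zip(rows, names) if n == k] for k in keys}
-- ===== Notes on version B (the rewrite author's own statement) =====
-- stated objective: alternative
-- what changed: Replaces the single-pass dict-bucketing loop by a two-phase plan: precompute the stripped names, dedup them in first-occurrence order, then build each group by a filtering scan over the (row, name) pairs.
import Mathlib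
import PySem

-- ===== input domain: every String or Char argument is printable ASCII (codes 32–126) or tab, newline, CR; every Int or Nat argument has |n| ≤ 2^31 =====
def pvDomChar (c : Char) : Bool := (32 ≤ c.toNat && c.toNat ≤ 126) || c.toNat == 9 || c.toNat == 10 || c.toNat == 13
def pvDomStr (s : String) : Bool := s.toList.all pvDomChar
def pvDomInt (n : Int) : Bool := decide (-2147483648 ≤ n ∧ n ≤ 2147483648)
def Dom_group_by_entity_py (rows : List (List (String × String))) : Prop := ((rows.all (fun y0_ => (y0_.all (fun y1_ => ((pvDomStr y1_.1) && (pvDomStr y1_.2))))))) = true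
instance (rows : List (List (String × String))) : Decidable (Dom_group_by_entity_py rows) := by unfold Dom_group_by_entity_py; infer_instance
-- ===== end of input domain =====

-- B replaces A's single-pass dict bucketing by dedup-of-names + per-key filtering scans (alternative decomposition, same results).

-- ===== PORT A =====
-- row.get('entity_name', '').strip()  (shared expression of both Pythons)
def pvEntityName (row : List (String × String)) : String :=
  PySem.Str.strip (PySem.Dict.getD (PySem.Dict.mk row) "entity_name" "")

def group_by_entity_py (rows : List (List (String × String))) : List (String × List (List (String × String))) :=
  (rows.foldl
    (fun (entities : PySem.Dict String (List (List (String × String)))) row =>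
      let entity_name := pvEntityName row
      if entity_name = "" then entities
      else
        let entities := if entities.contains entity_name then entities
                        else entities.insert entity_name []
        entities.modify entity_name [] (fun l => l ++ [row]))
    PySem.Dict.empty).items

-- ===== PORT B =====
def group_by_entity_py_alt (rows : List (List (String × String))) : List (String × List (List (String × String))) :=
  let names := rows.map pvEntityName
  let keys := PySem.List.dedup (names.filter (fun n => !(n == "")))
  keys.map (fun k => (k, ((rows.zip names).filter (fun p => p.2 == k)).map (fun p => p.1)))

-- ===== PRECONDITION & SPEC =====
def Spec_group_by_entity_py (rows : List (List (String × String))) (out : List (String × List (List (String × String)))) : Prop := out = group_by_entity_py_alt rows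
instance (rows : List (List (String × String))) (out : List (String × List (List (String × String)))) : Decidable (Spec_group_by_entity_py rows out) := by unfold Spec_group_by_entity_py; infer_instance

-- ===== CLAIM (what is proved, stated in full; the proofs are below) =====
def Claim_equal_group_by_entity_py : Prop := ∀ (rows : List (List (String × String))), Dom_group_by_entity_py rows → Spec_group_by_entity_py rows (group_by_entity_py rows)

-- ===== LEMMAS AND PROOFS =====

-- the filtered (name, row) pairs A's loop effectively processes
def pvPairs (rows : List (List (String × String))) : List (String × List (String × String)) :=
  (rows.map (fun r => (pvEntityName r, r))).filter (fun p => !(p.1 == ""))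

-- ensuring the key then appending = modify with default []
theorem pv_step_modify (d : PySem.Dict String (List (List (String × String))))
    (n : String) (row : List (String × String)) :
    (if d.contains n then d else d.insert n []).modify n [] (fun l => l ++ [row])
      = d.modify n [] (fun l => l ++ [row]) := by
  by_cases h : d.contains n
  · simp [h]
  · have h' : d.contains n = false := by simpa using h
    simp only [h, if_neg, Bool.false_eq_true, not_false_iff]
    simp [PySem.Dict.modify, PySem.Dict.getD_insert_self, PySem.Dict.insert_insert_self,
      PySem.Dict.getD_of_not_contains, h']

theorem pv_foldA_eq (rows : List (List (String × String)))
    (d : PySem.Dict String (List (List (String × String)))) :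
    rows.foldl
      (fun entities row =>
        let entity_name := pvEntityName row
        if entity_name = "" then entities
        else
          let entities := if entities.contains entity_name then entities
                          else entities.insert entity_name []
          entities.modify entity_name [] (fun l => l ++ [row])) d
    = (pvPairs rows).foldl (fun d p => d.modify p.1 [] (fun l => l ++ [p.2])) d := by
  induction rows generalizing d with
  | nil => rfl
  | cons r rs ih =>
    simp only [List.foldl_cons]
    rw [ih]
    by_cases h : pvEntityName r = ""
    · simp [pvPairs, h]
    · have hp : pvPairs (r :: rs) = (pvEntityName r, r) :: pvPairs rs := by
        simp [pvPairs, h]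
      rw [hp, List.foldl_cons]
      congr 1
      simp only [if_neg h]
      exact pv_step_modify d (pvEntityName r) r

theorem pv_fst_pairs (rows : List (List (String × String))) :
    (pvPairs rows).map (fun p => p.1) = (rows.map pvEntityName).filter (fun n => !(n == "")) := by
  induction rows with
  | nil => simp [pvPairs]
  | cons r rs ih =>
    simp only [pvPairs, List.map_cons, List.filter_cons] at *
    by_cases h : pvEntityName r = "" <;> simp [h, ih]

theorem pv_group_eq (rows : List (List (String × String))) (k : String) (hk : k ≠ "") :
    ((pvPairs rows).filter (fun p => p.1 == k)).map (fun p => p.2)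
      = ((rows.zip (rows.map pvEntityName)).filter (fun p => p.2 == k)).map (fun p => p.1) := by
  induction rows with
  | nil => simp [pvPairs]
  | cons r rs ih =>
    have hz : (r :: rs).zip ((r :: rs).map pvEntityName)
        = (r, pvEntityName r) :: rs.zip (rs.map pvEntityName) := by simp
    by_cases h0 : pvEntityName r = ""
    · have hne : ¬ (pvEntityName r = k) := by rw [h0]; exact fun e => hk e.symm
      have hp : pvPairs (r :: rs) = pvPairs rs := by simp [pvPairs, h0]
      rw [hp, hz]
      simp [hne, ih]
    · have hp : pvPairs (r :: rs) = (pvEntityName r, r) :: pvPairs rs := by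
        simp [pvPairs, h0]
      rw [hp, hz]
      by_cases h : pvEntityName r = k <;> simp [h, ih]

-- ===== VERDICT (by name: the statement is the Claim_ definition above) =====
theorem group_by_entity_py_spec : Claim_equal_group_by_entity_py := by
  intro rows _
  unfold Spec_group_by_entity_py group_by_entity_py group_by_entity_py_alt
  rw [pv_foldA_eq]
  have hnd : ((pvPairs rows).foldl (fun d p => d.modify p.1 [] (fun l => l ++ [p.2]))
      PySem.Dict.empty).keys.Nodup := by
    apply PySem.Dict.nodup_keys_foldl_modify_key
    simp
  rw [PySem.Dict.items_eq_map_keys _ hnd []]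
  rw [PySem.Dict.keys_foldl_modify_key]
  simp only [PySem.Dict.keys_empty, PySem.Set.update_nil_left]
  rw [← PySem.List.dedup_eq_ofList, pv_fst_pairs]
  apply List.map_congr_left
  intro k hk
  have hk' : k ≠ "" := by
    have := (PySem.List.mem_dedup _ _).mp hk
    simp only [List.mem_filter, Bool.not_eq_eq_eq_not, Bool.not_true, beq_eq_false_iff_ne] at this
    exact this.2
  refine Prod.ext rfl ?_
  simp only
  rw [PySem.Dict.getD_foldl_modify_append, PySem.Dict.getD_empty, List.nil_append]
  exact pv_group_eq rows k hk'
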